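-- pv_equiv track=rewrite | github.com/darbyhtml/proficrm | backend/messenger/utils.py | compact_working_hours_display
-- ===== SOURCE A (Python) =====
-- def compact_working_hours_display(enabled: bool, schedule: dict) -> str:
--     """
--     Формирует компактную строку расписания для отображения в виджете и настройках.
--     Пример: «Пн–Пт 09:00–18:00, Сб 10:00–14:00».
--     """
--     if not enabled or not schedule:
--         return "Обычно отвечаем в течение нескольких минут"
--     day_labels = ["Пн", "Вт", "Ср", "Чт", "Пт", "Сб", "Вс"]
--     slots = []
--     for i in range(1, 8):
--         slot = schedule.get(str(i), [])
--         if isinstance(slot, (list, tuple)) and len(slot) >= 2: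
--             slots.append((day_labels[i - 1], str(slot[0]).strip(), str(slot[1]).strip()))
--         else:
--             slots.append((day_labels[i - 1], None, None))
--     parts = []
--     i = 0
--     while i < 7:
--         label, start, end = slots[i]
--         if start is None and end is None:
--             i += 1
--             continue
--         j = i + 1
--         while j < 7 and slots[j][1] == start and slots[j][2] == end:
--             j += 1
--         if j == i + 1:
--             parts.append(f"{label} {start}–{end}")
--         else:
--             parts.append(f"{label}–{slots[j - 1][0]} {start}–{end}")
--         i = j
--     if not parts:
--         return "Обычно отвечаем в течение нескольких минут"
--     return ", ".join(parts)
-- ===== SOURCE B (Python) =====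
-- def compact_working_hours_display(enabled: bool, schedule: dict) -> str:
--     FALLBACK = "Обычно отвечаем в течение нескольких минут"
--     if not enabled or not schedule:
--         return FALLBACK
--     day_labels = ["Пн", "Вт", "Ср", "Чт", "Пт", "Сб", "Вс"]
--     slots = []
--     for idx, lbl in enumerate(day_labels, start=1):
--         slot = schedule.get(str(idx), [])
--         if isinstance(slot, (list, tuple)) and len(slot) >= 2:
--             slots.append((lbl, str(slot[0]).strip(), str(slot[1]).strip()))
--         else:
--             slots.append((lbl, None, None))
--     parts = []
--     run = None  # (first_label, last_label_or_None, start, end)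
--
--     def flush():
--         nonlocal run
--         if run is not None:
--             l1, l2, s, e = run
--             parts.append(f"{l1} {s}–{e}" if l2 is None else f"{l1}–{l2} {s}–{e}")
--             run = None
--
--     for lbl, s, e in slots:
--         if s is None and e is None:
--             flush()
--         elif run is not None and run[2] == s and run[3] == e:
--             run = (run[0], lbl, run[2], run[3])
--         else:
--             flush()
--             run = (lbl, None, s, e)
--     flush()
--     return ", ".join(parts) if parts else FALLBACK
-- ===== Notes on version B (the rewrite author's own statement) =====
-- stated objective: alternative
-- what changed: Replaces A's two-pointer while-loop (inner scan that re-walks the slot list to find each run's end, then jumps the outer index) with a single forward pass over the 7 slots maintaining an active-run accumulator that is flushed on a closed day or on a change of hours.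
import Mathlib
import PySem

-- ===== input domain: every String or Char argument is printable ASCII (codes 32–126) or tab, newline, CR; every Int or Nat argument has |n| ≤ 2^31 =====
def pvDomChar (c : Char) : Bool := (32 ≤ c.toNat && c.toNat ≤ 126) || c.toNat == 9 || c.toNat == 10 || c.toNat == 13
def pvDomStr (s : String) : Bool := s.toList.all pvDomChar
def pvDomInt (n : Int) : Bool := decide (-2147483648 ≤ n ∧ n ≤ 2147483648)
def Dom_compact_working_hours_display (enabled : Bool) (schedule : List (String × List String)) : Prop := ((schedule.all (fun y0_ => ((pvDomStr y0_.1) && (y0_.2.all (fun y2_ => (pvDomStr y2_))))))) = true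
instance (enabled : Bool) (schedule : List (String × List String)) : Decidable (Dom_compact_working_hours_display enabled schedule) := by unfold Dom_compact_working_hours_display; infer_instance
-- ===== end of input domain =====

-- B replaces A's two-pointer run scan by a single forward pass with a flushable
-- active-run accumulator; same return value, no speed claim (7 slots either way).

-- ===== PORT A =====

def pvFallback : String := "Обычно отвечаем в течение нескольких минут"

def pvLabels : List String := ["Пн", "Вт", "Ср", "Чт", "Пт", "Сб", "Вс"]

-- the inner-while predicate 'slots[j][1] == start and slots[j][2] == end'
def pRun (s e : String) (t : String × Option String × Option String) : Bool :=
  t.2.1 == some s && t.2.2 == some e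

-- 'for i in range(1, 8): …' building the 7 (label, start, end) slots;
-- schedule.get(str(i), []) is first-match association-list lookup
def aSlots (schedule : List (String × List String)) : List (String × Option String × Option String) :=
  (PySem.List.pyRange 1 8 1).foldl (fun slots i =>
    let slot := (List.lookup (PySem.Int.toStr i) schedule).getD []
    let lbl := PySem.List.pyGetD pvLabels (i - 1) ""
    slots ++ [match slot with
      | s0 :: s1 :: _ => (lbl, some (PySem.Str.strip s0), some (PySem.Str.strip s1))
      | _ => (lbl, none, none)]) []

-- the 'while i < 7' / inner 'while j < 7' two-pointer scan, as recursion on the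
-- remaining slot list (takeWhile/dropWhile = the inner j-scan).  aSlots only
-- produces (some, some) or (none, none) hour pairs, so the catch-all arm is
-- exactly Python's 'start is None and end is None: continue' on reachable input.
def aParts : List (String × Option String × Option String) → List String
  | [] => []
  | (label, some s, some e) :: rest =>
      let run := rest.takeWhile (pRun s e)
      let rest' := rest.dropWhile (pRun s e)
      (if run.isEmpty then label ++ " " ++ s ++ "–" ++ e
       else label ++ "–" ++ (run.getLastD (label, some s, some e)).1 ++ " " ++ s ++ "–" ++ e)
        :: aParts rest'
  | _ :: rest => aParts rest
termination_by l => l.length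
decreasing_by
  · exact Nat.lt_succ_of_le (List.length_dropWhile_le _ _)
  · simp

def compact_working_hours_display (enabled : Bool) (schedule : List (String × List String)) : String :=
  if !enabled || schedule.isEmpty then pvFallback
  else
    let parts := aParts (aSlots schedule)
    if parts.isEmpty then pvFallback
    else PySem.Str.join ", " parts

-- ===== PORT B =====

-- flush(): emit the active run, if any
def bEmit (l1 : String) (ol2 : Option String) (s e : String) : String :=
  match ol2 with
  | none => l1 ++ " " ++ s ++ "–" ++ e
  | some l2 => l1 ++ "–" ++ l2 ++ " " ++ s ++ "–" ++ e

def bFlush (parts : List String) (run : Option (String × Option String × String × String)) : List String :=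
  match run with
  | some (l1, ol2, s, e) => parts ++ [bEmit l1 ol2 s e]
  | none => parts

-- one day of the single pass: closed day flushes, matching hours extend the
-- run, otherwise flush and start a new run
def bStep (acc : List String × Option (String × Option String × String × String))
    (slot : String × Option String × Option String) :
    List String × Option (String × Option String × String × String) :=
  match slot with
  | (lbl, some s, some e) =>
      match acc.2 with
      | some (l1, ol2, cs, ce) =>
          if cs = s ∧ ce = e then (acc.1, some (l1, some lbl, cs, ce))
          else (bFlush acc.1 acc.2, some (lbl, none, s, e))
      | none => (acc.1, some (lbl, none, s, e))
  | _ => (bFlush acc.1 acc.2, none)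

-- 'for idx, lbl in enumerate(day_labels, start=1)'
def bSlots (schedule : List (String × List String)) : List (String × Option String × Option String) :=
  (PySem.List.enumerate pvLabels 1).map (fun p =>
    match (List.lookup (PySem.Int.toStr p.1) schedule).getD [] with
    | s0 :: s1 :: _ => (p.2, some (PySem.Str.strip s0), some (PySem.Str.strip s1))
    | _ => (p.2, none, none))

def compact_working_hours_display_alt (enabled : Bool) (schedule : List (String × List String)) : String :=
  if !enabled || schedule.isEmpty then pvFallback
  else
    let acc := (bSlots schedule).foldl bStep ([], none)
    let parts := bFlush acc.1 acc.2
    if parts.isEmpty then pvFallback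
    else PySem.Str.join ", " parts

-- ===== PRECONDITION & SPEC =====
def Spec_compact_working_hours_display (enabled : Bool) (schedule : List (String × List String)) (out : String) : Prop := out = compact_working_hours_display_alt enabled schedule
instance (enabled : Bool) (schedule : List (String × List String)) (out : String) : Decidable (Spec_compact_working_hours_display enabled schedule out) := by unfold Spec_compact_working_hours_display; infer_instance

-- ===== CLAIM (what is proved, stated in full; the proofs are below) =====
def Claim_equal_compact_working_hours_display : Prop := ∀ (enabled : Bool) (schedule : List (String × List String)), Dom_compact_working_hours_display enabled schedule → Spec_compact_working_hours_display enabled schedule (compact_working_hours_display enabled schedule)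

-- ===== LEMMAS AND PROOFS =====

-- last label of the run extension list, with a fallback
def runLast : List (String × Option String × Option String) → Option String → Option String
  | [], ol2 => ol2
  | x :: tl, _ => runLast tl (some x.1)

theorem runLast_eq (tw : List (String × Option String × Option String)) :
    ∀ ol2, runLast tw ol2 = (tw.getLast?.map (·.1)).or ol2 := by
  induction tw with
  | nil => intro ol2; rfl
  | cons x tl ih =>
      intro ol2
      rw [show runLast (x :: tl) ol2 = runLast tl (some x.1) from rfl, ih (some x.1)]
      cases htl : tl with
      | nil => simp
      | cons y ys =>
          obtain ⟨z, hz⟩ := Option.isSome_iff_exists.mp (show ((y :: ys).getLast?).isSome by simp)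
          simp [List.getLast?_cons_cons, hz]

-- what A still has to emit, given B's in-flight state
def aCont (st : Option (String × Option String × String × String))
    (slots : List (String × Option String × Option String)) : List String :=
  match st with
  | none => aParts slots
  | some (l1, ol2, s, e) =>
      bEmit l1 (runLast (slots.takeWhile (pRun s e)) ol2) s e
        :: aParts (slots.dropWhile (pRun s e))

theorem aParts_cons_some (lbl s e : String) (rest : List (String × Option String × Option String)) :
    aParts ((lbl, some s, some e) :: rest)
      = bEmit lbl (runLast (rest.takeWhile (pRun s e)) none) s e
          :: aParts (rest.dropWhile (pRun s e)) := by
  rw [aParts, runLast_eq]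
  cases htw : rest.takeWhile (pRun s e) with
  | nil => simp [bEmit]
  | cons y ys =>
      simp only [List.isEmpty_cons, Option.or_none, if_false, Bool.false_eq_true]
      have hne : (y :: ys) ≠ ([] : List (String × Option String × Option String)) := by simp
      simp [List.getLastD, List.getLast?_eq_some_getLast (l := y :: ys), bEmit]

theorem foldl_bStep_eq (slots : List (String × Option String × Option String)) :
    ∀ (parts : List String) (st : Option (String × Option String × String × String)),
      bFlush ((slots.foldl bStep (parts, st)).1) ((slots.foldl bStep (parts, st)).2)
        = parts ++ aCont st slots := by
  induction slots with
  | nil =>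
      intro parts st
      cases st with
      | none => simp [bFlush, aCont, aParts]
      | some r =>
          obtain ⟨l1, ol2, s, e⟩ := r
          simp [bFlush, aCont, aParts, runLast]
  | cons x tl ih =>
      intro parts st
      obtain ⟨lbl, os, oe⟩ := x
      cases st with
      | none =>
          match os, oe with
          | some s, some e =>
              rw [List.foldl_cons, show bStep (parts, none) (lbl, some s, some e)
                    = (parts, some (lbl, none, s, e)) from rfl, ih]
              rw [aCont, aParts_cons_some]
              rfl
          | none, o =>
              rw [List.foldl_cons, show bStep (parts, none) (lbl, none, o)
                    = (parts, none) from rfl, ih]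
              simp [aCont, aParts]
          | some s, none =>
              rw [List.foldl_cons, show bStep (parts, none) (lbl, some s, none)
                    = (parts, none) from rfl, ih]
              simp [aCont, aParts]
      | some r =>
          obtain ⟨l1, ol2, cs, ce⟩ := r
          match os, oe with
          | some s, some e =>
              by_cases hm : cs = s ∧ ce = e
              · obtain ⟨hs, he⟩ := hm
                subst hs; subst he
                rw [List.foldl_cons, show bStep (parts, some (l1, ol2, cs, ce)) (lbl, some cs, some ce)
                      = (parts, some (l1, some lbl, cs, ce)) from by simp [bStep], ih]
                have hp : pRun cs ce (lbl, some cs, some ce) = true := by simp [pRun]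
                simp [aCont, hp, runLast]
              · rw [List.foldl_cons, show bStep (parts, some (l1, ol2, cs, ce)) (lbl, some s, some e)
                      = (parts ++ [bEmit l1 ol2 cs ce], some (lbl, none, s, e)) from by
                        simp [bStep, bFlush, hm], ih]
                have hp : pRun cs ce (lbl, some s, some e) = false := by
                  cases hpc : pRun cs ce (lbl, some s, some e) with
                  | false => rfl
                  | true =>
                      simp only [pRun, Bool.and_eq_true, beq_iff_eq, Option.some.injEq] at hpc
                      exact absurd ⟨hpc.1.symm, hpc.2.symm⟩ hm
                rw [aCont, aCont, List.takeWhile_cons_of_neg (by simp [hp]),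
                  List.dropWhile_cons_of_neg (by simp [hp]), runLast, aParts_cons_some]
                simp
          | none, o =>
              rw [List.foldl_cons, show bStep (parts, some (l1, ol2, cs, ce)) (lbl, none, o)
                    = (parts ++ [bEmit l1 ol2 cs ce], none) from rfl, ih]
              have hp : pRun cs ce (lbl, none, o) = false := by simp [pRun]
              rw [aCont, aCont, List.takeWhile_cons_of_neg (by simp [hp]),
                List.dropWhile_cons_of_neg (by simp [hp]), runLast]
              simp [aParts]
          | some s, none =>
              rw [List.foldl_cons, show bStep (parts, some (l1, ol2, cs, ce)) (lbl, some s, none)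
                    = (parts ++ [bEmit l1 ol2 cs ce], none) from rfl, ih]
              have hp : pRun cs ce (lbl, some s, none) = false := by simp [pRun]
              rw [aCont, aCont, List.takeWhile_cons_of_neg (by simp [hp]),
                List.dropWhile_cons_of_neg (by simp [hp]), runLast]
              simp [aParts]

theorem slots_eq (schedule : List (String × List String)) : aSlots schedule = bSlots schedule := by
  rfl

-- ===== VERDICT (by name: the statement is the Claim_ definition above) =====
theorem compact_working_hours_display_spec : Claim_equal_compact_working_hours_display := by
  intro enabled schedule _
  unfold Spec_compact_working_hours_display
  unfold compact_working_hours_display compact_working_hours_display_alt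
  rw [slots_eq]
  have h := foldl_bStep_eq (bSlots schedule) [] none
  simp only [aCont] at h
  rw [show ([] : List String) ++ aParts (bSlots schedule) = aParts (bSlots schedule) from rfl] at h
  simp only [h]
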